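-- pv_equiv track=rewrite | github.com/issywrigs/PythonProject | Programming for Economists II/MIDTERM/MT_Q5.py | find_bob_patterns
-- ===== SOURCE A (Python) =====
-- def find_bob_patterns(text):
--     """
--     Finds all occurrences of patterns starting with 'b', ending with 'Bob',
--     and having unlimited letters in between (ignoring punctuation around 'b' and 'Bob').
--     :param text: The text to look into.
--     :return: The number of matches.
--     """
--     punctuation = ".,%!?()\"':;-"
--     for p in punctuation:
--         text = text.replace(p, "")
--
--     count = 0
--     start = 0
--
--     while True:
--         # Find the first occurrence of "b" from current position
--         start = text.find("b", start)
--
--         if start == -1: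
--             break  # No more 'b', stop the loop
--
--         # Find the next occurrence of "Bob" after "b"
--         end = text.find("Bob", start + 1)
--
--         # If "Bob" is found and is after the current "b"
--         if end != -1 and end > start:
--             count += 1
--             # Move start past this occurrence to avoid finding the same match again
--             start = end + 3  # Move past "Bob"
--         else:
--             # If no "Bob" after this "b", move past this "b"
--             start += 1
--
--     return count
-- ===== SOURCE B (Python) =====
-- def find_bob_patterns(text):
--     punctuation = ".,%!?()\"':;-"
--     s = ''.join(ch for ch in text if ch not in punctuation)
--     n = len(s)
--     count = 0
--     pending = False
--     i = 0
--     while i < n: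
--         if pending:
--             if s[i] == 'B' and s[i + 1:i + 3] == 'ob':
--                 count += 1
--                 pending = False
--                 i += 3
--             else:
--                 i += 1
--         else:
--             if s[i] == 'b':
--                 pending = True
--             i += 1
--     return count
-- ===== Notes on version B (the rewrite author's own statement) =====
-- stated objective: faster
-- what changed: Replaced the repeated str.find rescans (quadratic on worst-case texts) by a single left-to-right scan with a pending-match flag, and the per-character replace passes by one filter pass.
import Mathlib
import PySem

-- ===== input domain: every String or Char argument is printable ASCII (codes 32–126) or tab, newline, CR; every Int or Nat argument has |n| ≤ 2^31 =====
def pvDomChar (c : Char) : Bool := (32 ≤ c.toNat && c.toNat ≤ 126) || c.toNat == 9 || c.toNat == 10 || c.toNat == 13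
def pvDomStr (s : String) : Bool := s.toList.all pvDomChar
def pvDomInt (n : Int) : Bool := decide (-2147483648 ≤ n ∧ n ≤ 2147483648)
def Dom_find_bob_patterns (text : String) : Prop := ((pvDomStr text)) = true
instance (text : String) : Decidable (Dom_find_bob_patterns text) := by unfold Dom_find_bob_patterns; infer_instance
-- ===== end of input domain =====

-- B replaces A's repeated str.find rescans by a single left-to-right scan with a
-- pending-match flag, and the per-punctuation-character replace passes by one filter pass.

-- ===== PORT A =====
-- the punctuation string ".,%!?()\"':;-" as a list of characters (shared literal)
def pvPunct : List Char := ['.', ',', '%', '!', '?', '(', ')', '"', '\'', ':', ';', '-']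

-- A's while-loop; fuel only makes the recursion total (start grows by ≥ 1 per iteration)
def findA_loop (s : List Char) : Nat → Int → Int → Int
  | 0, _, count => count
  | fuel + 1, start, count =>
    let start' := PySem.Chars.findFrom s ['b'] start none
    if start' = -1 then count
    else
      let e := PySem.Chars.findFrom s ['B', 'o', 'b'] (start' + 1) none
      if e ≠ -1 ∧ e > start' then findA_loop s fuel (e + 3) (count + 1)
      else findA_loop s fuel (start' + 1) count

def find_bob_patterns (text : String) : Int :=
  let s := pvPunct.foldl (fun t p => PySem.Chars.replace t [p] []) text.toList
  findA_loop s (s.length + 2) 0 0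

-- ===== PORT B =====
-- Source B's single scan; `ch not in punctuation` is single-char membership, ported as contains
def findB_loop (s : List Char) (i : Nat) (pending : Bool) (count : Int) : Int :=
  if h : i < s.length then
    if pending then
      if s[i] = 'B' ∧ PySem.List.slice s (some ((i : Int) + 1)) (some ((i : Int) + 3)) = ['o', 'b'] then
        findB_loop s (i + 3) false (count + 1)
      else findB_loop s (i + 1) pending count
    else
      if s[i] = 'b' then findB_loop s (i + 1) true count
      else findB_loop s (i + 1) false count
  else count
termination_by s.length - i

def find_bob_patterns_alt (text : String) : Int :=
  let s := text.toList.filter (fun ch => !pvPunct.contains ch)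
  findB_loop s 0 false 0

-- ===== PRECONDITION & SPEC =====
def Spec_find_bob_patterns (text : String) (out : Int) : Prop := out = find_bob_patterns_alt text
instance (text : String) (out : Int) : Decidable (Spec_find_bob_patterns text out) := by unfold Spec_find_bob_patterns; infer_instance

-- ===== CLAIM (what is proved, stated in full; the proofs are below) =====
def Claim_equal_find_bob_patterns : Prop := ∀ (text : String), Dom_find_bob_patterns text → Spec_find_bob_patterns text (find_bob_patterns text)

-- ===== LEMMAS AND PROOFS =====

-- removing a single character with str.replace is a filter
theorem replace_go_single (p : Char) (fuel : Nat) :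
    ∀ (l acc : List Char), l.length ≤ fuel →
      PySem.Chars.replace.go [p] [] fuel l acc
        = acc.reverse ++ l.filter (fun c => !(c == p)) := by
  induction fuel with
  | zero => intro l acc h; simp at h; simp [h, PySem.Chars.replace.go]
  | succ n ih =>
    intro l acc h
    match l with
    | [] => simp [PySem.Chars.replace.go]
    | c :: t =>
      rw [PySem.Chars.replace.go]
      by_cases hc : c = p
      · have : List.isPrefixOf [p] (c :: t) = true := by simp [List.isPrefixOf, hc]
        rw [if_pos this]
        simp only [List.length_cons] at h
        rw [ih _ _ (by simpa using Nat.le_of_succ_le_succ h)]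
        simp [hc]
      · have : List.isPrefixOf [p] (c :: t) = false := by simp [List.isPrefixOf]; exact fun hh => (hc hh.symm).elim
        rw [if_neg (by simp [this])]
        simp only [List.length_cons] at h
        rw [ih _ _ (Nat.le_of_succ_le_succ h)]
        simp [hc]
theorem replace_single (p : Char) (l : List Char) :
    PySem.Chars.replace l [p] [] = l.filter (fun c => !(c == p)) := by
  rw [PySem.Chars.replace]
  simp only [List.isEmpty_iff]
  rw [replace_go_single p l.length l [] le_rfl]
  simp

theorem clean_eq (ps cs : List Char) :
    ps.foldl (fun t p => PySem.Chars.replace t [p] []) cs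
      = cs.filter (fun ch => !ps.contains ch) := by
  induction ps generalizing cs with
  | nil => simp
  | cons p ps ih =>
    simp only [List.foldl_cons]
    rw [replace_single, ih, List.filter_filter]
    apply List.filter_congr
    intro c _
    by_cases hc : c = p <;> by_cases hm : c ∈ ps <;> simp [hc, hm]

-- a "Bob" occurrence starting at position j
def bobAt (s : List Char) (j : Nat) : Prop := ['B', 'o', 'b'] <+: s.drop j

theorem prefix_singleton_iff (a : Char) (l : List Char) : [a] <+: l ↔ l.head? = some a := by
  cases l <;> simp [List.cons_prefix_cons, eq_comm]
theorem bAt_iff (s : List Char) (j : Nat) : ['b'] <+: s.drop j ↔ s[j]? = some 'b' := by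
  rw [prefix_singleton_iff]; simp [List.head?_drop]
theorem bobAt_lt (s : List Char) (j : Nat) (h : bobAt s j) : j + 3 ≤ s.length := by
  have := h.length_le
  simp [List.length_drop] at this
  omega

theorem bob_test_iff (s : List Char) (j : Nat) (h : j < s.length) :
    (s[j] = 'B' ∧ PySem.List.slice s (some ((j : Int) + 1)) (some ((j : Int) + 3)) = ['o', 'b'])
      ↔ bobAt s j := by
  unfold bobAt
  have h1 : ((j : Int) + 1) = ((j+1 : Nat) : Int) := by push_cast; ring
  have h3 : ((j : Int) + 3) = ((j+3 : Nat) : Int) := by push_cast; ring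
  rw [h1, h3, PySem.List.slice_natCast]
  have hd : s.drop j = s[j] :: s.drop (j+1) := List.drop_eq_getElem_cons h
  rw [hd]
  constructor
  · rintro ⟨hB, hsl⟩
    rw [hB, List.cons_prefix_cons]
    refine ⟨rfl, ?_⟩
    rw [List.prefix_iff_eq_take]
    simp at hsl
    simp [hsl]
  · intro hp
    rw [List.cons_prefix_cons] at hp
    obtain ⟨hB, hp⟩ := hp
    refine ⟨hB.symm, ?_⟩
    rw [List.prefix_iff_eq_take] at hp
    simpa using hp.symm

theorem B_false_done (s : List Char) : ∀ n i c, s.length - i ≤ n →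
    (∀ j, i ≤ j → s[j]? ≠ some 'b') → findB_loop s i false c = c := by
  intro n
  induction n with
  | zero =>
    intro i c hn h
    rw [findB_loop]
    rw [dif_neg (by omega)]
  | succ n ih =>
    intro i c hn h
    rw [findB_loop]
    by_cases hi : i < s.length
    · rw [dif_pos hi]
      simp only [Bool.false_eq_true, if_false]
      rw [if_neg (by
        intro hb
        exact h i le_rfl (by rw [List.getElem?_eq_getElem hi, hb]))]
      exact ih (i+1) c (by omega) (fun j hj => h j (by omega))
    · rw [dif_neg hi]

theorem B_false_skip (s : List Char) : ∀ n i c, s.length - i ≤ n → ∀ j, i ≤ j →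
    s[j]? = some 'b' → (∀ m, i ≤ m → m < j → s[m]? ≠ some 'b') →
    findB_loop s i false c = findB_loop s (j + 1) true c := by
  intro n
  induction n with
  | zero =>
    intro i c hn j hij hj hmin
    have hjlt : j < s.length := by
      by_contra hh
      rw [List.getElem?_eq_none (by omega)] at hj; simp at hj
    omega
  | succ n ih =>
    intro i c hn j hij hj hmin
    have hjlt : j < s.length := by
      by_contra hh
      rw [List.getElem?_eq_none (by omega)] at hj; simp at hj
    rw [findB_loop]
    rw [dif_pos (by omega)]
    simp only [Bool.false_eq_true, if_false]
    by_cases hii : i = j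
    · subst hii
      rw [if_pos (by
        have := hj; rw [List.getElem?_eq_getElem hjlt] at this; exact Option.some.inj this)]
    · rw [if_neg (by
        intro hb
        exact hmin i le_rfl (by omega) (by rw [List.getElem?_eq_getElem (by omega), hb]))]
      exact ih (i+1) c (by omega) j (by omega) hj (fun m hm hmj => hmin m (by omega) hmj)

theorem B_true_done (s : List Char) : ∀ n i c, s.length - i ≤ n →
    (∀ j, i ≤ j → ¬ bobAt s j) → findB_loop s i true c = c := by
  intro n
  induction n with
  | zero =>
    intro i c hn h
    rw [findB_loop, dif_neg (by omega)]
  | succ n ih =>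
    intro i c hn h
    rw [findB_loop]
    by_cases hi : i < s.length
    · rw [dif_pos hi, if_pos rfl]
      rw [if_neg (fun hc => h i le_rfl ((bob_test_iff s i hi).mp hc))]
      exact ih (i+1) c (by omega) (fun j hj => h j (by omega))
    · rw [dif_neg hi]

theorem B_noBob_false (s : List Char) : ∀ n i c, s.length - i ≤ n →
    (∀ j, i ≤ j → ¬ bobAt s j) → findB_loop s i false c = c := by
  intro n
  induction n with
  | zero =>
    intro i c hn h
    rw [findB_loop, dif_neg (by omega)]
  | succ n ih =>
    intro i c hn h
    rw [findB_loop]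
    by_cases hi : i < s.length
    · rw [dif_pos hi]
      simp only [Bool.false_eq_true, if_false]
      by_cases hb : s[i] = 'b'
      · rw [if_pos hb]
        exact B_true_done s n (i+1) c (by omega) (fun j hj => h j (by omega))
      · rw [if_neg hb]
        exact ih (i+1) c (by omega) (fun j hj => h j (by omega))
    · rw [dif_neg hi]

theorem B_true_skip (s : List Char) : ∀ n i c, s.length - i ≤ n → ∀ j, i ≤ j →
    bobAt s j → (∀ m, i ≤ m → m < j → ¬ bobAt s m) →
    findB_loop s i true c = findB_loop s (j + 3) false (c + 1) := by
  intro n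
  induction n with
  | zero =>
    intro i c hn j hij hj hmin
    have := bobAt_lt s j hj
    omega
  | succ n ih =>
    intro i c hn j hij hj hmin
    have hjlt : j < s.length := by have := bobAt_lt s j hj; omega
    rw [findB_loop, dif_pos (by omega), if_pos rfl]
    by_cases hii : i = j
    · subst hii
      rw [if_pos ((bob_test_iff s i hjlt).mpr hj)]
    · rw [if_neg (fun hc => hmin i le_rfl (by omega) ((bob_test_iff s i (by omega)).mp hc))]
      exact ih (i+1) c (by omega) j (by omega) hj (fun m hm hmj => hmin m (by omega) hmj)

lemma no_prefix_of_not_infix (sub s : List Char) (k : Nat)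
    (h : ¬ sub <:+: s.drop k) : ∀ j, k ≤ j → ¬ sub <+: s.drop j := by
  intro j hj hp
  apply h
  have hd : s.drop j = (s.drop k).drop (j - k) := by
    rw [List.drop_drop]; congr 1; omega
  rw [hd] at hp
  exact hp.isInfix.trans (List.drop_suffix (j - k) (s.drop k)).isInfix

lemma main_sim (s : List Char) : ∀ (fuel : Nat), ∀ (k : Nat) (c : Int),
    k ≤ s.length → s.length - k < fuel →
    findA_loop s fuel (k : Int) c = findB_loop s k false c := by
  intro fuel
  induction fuel with
  | zero => intro k c hk hf; omega
  | succ fuel ih =>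
    intro k c hk hf
    rw [findA_loop]
    by_cases h1 : PySem.Chars.findFrom s ['b'] (k : Int) none = -1
    · rw [if_pos h1]
      rw [B_false_done s (s.length - k) k c le_rfl]
      intro j hj hb
      have hninf := (PySem.Chars.findFrom_natCast_eq_neg_one_iff s ['b'] k hk).mp h1
      exact no_prefix_of_not_infix _ s k hninf j hj ((bAt_iff s j).mpr hb)
    · rw [if_neg h1]
      obtain ⟨hkle, hpre, hminA⟩ := PySem.Chars.findFrom_natCast_spec s ['b'] k hk h1
      set st := PySem.Chars.findFrom s ['b'] (k : Int) none with hst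
      have hst0 : (0 : Int) ≤ st := le_trans (by positivity) hkle
      set j := st.toNat with hj
      have hstj : st = (j : Int) := (Int.toNat_of_nonneg hst0).symm
      have hkj : k ≤ j := by omega
      have hjlt : j < s.length := by
        have := hpre.length_le
        simp only [List.length_drop, List.length_cons, List.length_nil] at this
        omega
      have hBskip : findB_loop s k false c = findB_loop s (j + 1) true c := by
        apply B_false_skip s (s.length - k) k c le_rfl j hkj ((bAt_iff s j).mp hpre)
        intro m hm hmj hb
        exact hminA m hm hmj ((bAt_iff s m).mpr hb)
      have hcast1 : st + 1 = ((j + 1 : Nat) : Int) := by rw [hstj]; push_cast; ring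
      have hj1len : j + 1 ≤ s.length := by omega
      by_cases h2 : PySem.Chars.findFrom s ['B', 'o', 'b'] (st + 1) none = -1
      · rw [if_neg (by simp [h2])]
        rw [hcast1] at h2 ⊢
        have hnoBob : ∀ m, j + 1 ≤ m → ¬ bobAt s m := by
          intro m hm
          have hninf := (PySem.Chars.findFrom_natCast_eq_neg_one_iff s ['B','o','b'] (j+1) hj1len).mp h2
          exact no_prefix_of_not_infix _ s (j+1) hninf m hm
        rw [ih (j + 1) c hj1len (by omega),
            B_noBob_false s (s.length - (j+1)) (j+1) c le_rfl hnoBob, hBskip,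
            B_true_done s (s.length - (j+1)) (j+1) c le_rfl hnoBob]
      · rw [hcast1] at h2 ⊢
        obtain ⟨hmle, hpreE, hminE⟩ :=
          PySem.Chars.findFrom_natCast_spec s ['B','o','b'] (j+1) hj1len h2
        set e := PySem.Chars.findFrom s ['B','o','b'] ((j + 1 : Nat) : Int) none with he
        have he0 : (0 : Int) ≤ e := le_trans (by positivity) hmle
        set m := e.toNat with hm
        have hem : e = (m : Int) := (Int.toNat_of_nonneg he0).symm
        have hjm : j + 1 ≤ m := by omega
        have hbobm : bobAt s m := hpreE
        have hm3 : m + 3 ≤ s.length := bobAt_lt s m hbobm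
        rw [if_pos (by
          refine ⟨h2, ?_⟩
          rw [hem, hstj]
          exact_mod_cast (by omega : (j : Int) < (m : Int)))]
        have hcast3 : e + 3 = ((m + 3 : Nat) : Int) := by rw [hem]; push_cast; ring
        rw [hcast3, ih (m + 3) (c + 1) hm3 (by omega), hBskip]
        exact (B_true_skip s (s.length - (j+1)) (j+1) c le_rfl m hjm hbobm
          (fun t ht htm hb => hminE t ht htm hb)).symm

-- ===== VERDICT (by name: the statement is the Claim_ definition above) =====
theorem find_bob_patterns_spec : Claim_equal_find_bob_patterns := by
  intro text _
  unfold Spec_find_bob_patterns find_bob_patterns find_bob_patterns_alt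
  rw [clean_eq]
  exact main_sim _ _ 0 0 (Nat.zero_le _) (by omega)
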